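-- pv_equiv track=rewrite | github.com/sbl1996/zero | admin-portal/backend/app/bootstrap.py | _infer_asset_type
-- ===== SOURCE A (Python) =====
-- def _infer_asset_type(asset_key: str, lookups: dict[str, dict[str, str]] | None = None) -> str:
--     if lookups:
--         for asset_type in ("monster", "map", "skill"):
--             if asset_key in lookups.get(asset_type, {}):
--                 return asset_type
--     key = asset_key.lower()
--     if key.startswith(("m-", "boss-")):
--         return "monster"
--     if key.startswith("map-"):
--         return "map"
--     if key.startswith("skill-"):
--         return "skill"
--     return "misc"
-- ===== SOURCE B (Python) =====
-- def _infer_asset_type(asset_key: str, lookups: dict[str, dict[str, str]] | None = None) -> str: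
--     if lookups:
--         # single pass over the lookup tables, keeping the best (lowest-rank) matching type
--         prio = {"monster": 0, "map": 1, "skill": 2}
--         best = None
--         for asset_type, table in lookups.items():
--             if asset_type in prio and asset_key in table and (best is None or prio[asset_type] < prio[best]):
--                 best = asset_type
--         if best is not None:
--             return best
--     key = asset_key.lower()
--     for prefix, asset_type in (("m-", "monster"), ("boss-", "monster"),
--                                ("map-", "map"), ("skill-", "skill")):
--         if key.startswith(prefix):
--             return asset_type
--     return "misc"
-- ===== Notes on version B (the rewrite author's own statement) =====
-- stated objective: alternative
-- what changed: Replaces A's three per-type membership probes in priority order by a single pass over the lookup tables themselves keeping the best-ranked matching type in an accumulator, and replaces the startswith if-chain by a scan over a prefix->type table.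
import Mathlib
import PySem

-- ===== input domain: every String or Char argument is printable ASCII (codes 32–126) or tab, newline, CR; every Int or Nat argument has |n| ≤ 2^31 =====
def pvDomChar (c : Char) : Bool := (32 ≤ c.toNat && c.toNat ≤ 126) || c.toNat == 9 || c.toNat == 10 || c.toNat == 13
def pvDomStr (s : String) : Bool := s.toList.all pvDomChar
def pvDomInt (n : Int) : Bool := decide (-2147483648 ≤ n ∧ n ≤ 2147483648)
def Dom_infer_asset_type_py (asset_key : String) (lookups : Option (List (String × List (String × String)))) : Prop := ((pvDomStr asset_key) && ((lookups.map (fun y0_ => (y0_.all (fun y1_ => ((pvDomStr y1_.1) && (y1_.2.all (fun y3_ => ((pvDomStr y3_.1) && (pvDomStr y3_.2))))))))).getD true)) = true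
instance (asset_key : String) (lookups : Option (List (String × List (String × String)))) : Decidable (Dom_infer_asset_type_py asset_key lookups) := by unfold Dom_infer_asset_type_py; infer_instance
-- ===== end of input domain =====

-- ===== PORT A =====
-- B replaces the three ordered per-type probes by one accumulator pass over the tables (alternative decomposition, same cost).
-- lookups.get(asset_type, {}) : first match in the association list (dict get)
def pvLkGet (l : List (String × List (String × String))) (t : String) : List (String × String) :=
  PySem.Dict.getD (PySem.Dict.mk l) t []

def infer_asset_type_py (asset_key : String) (lookups : Option (List (String × List (String × String)))) : String :=
  let fromLookups : Option String :=
    match lookups with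
    | some l =>
      if l.isEmpty then none
      else ["monster", "map", "skill"].find? (fun t => (pvLkGet l t).any (fun kv => kv.1 == asset_key))
    | none => none
  match fromLookups with
  | some t => t
  | none =>
    let key := PySem.Str.lower asset_key
    if PySem.Str.startswith key "m-" || PySem.Str.startswith key "boss-" then "monster"
    else if PySem.Str.startswith key "map-" then "map"
    else if PySem.Str.startswith key "skill-" then "skill"
    else "misc"

-- ===== PORT B =====
-- prio = {"monster": 0, "map": 1, "skill": 2}
def pvPrio : PySem.Dict String Int := PySem.Dict.mk [("monster", 0), ("map", 1), ("skill", 2)]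

-- loop body: one lookups item (asset_type, table); 'prio[best]' can't miss in Python (best always a prio key),
-- so the getD default 3 on that lookup is unreachable
def pvStep (asset_key : String) (best : Option String) (e : String × List (String × String)) : Option String :=
  match pvPrio.get? e.1 with
  | some r =>
    if e.2.any (fun kv => kv.1 == asset_key) &&
       (match best with
        | none => true
        | some b => decide (r < pvPrio.getD b 3))
    then some e.1 else best
  | none => best

def pvPrefixTable : List (String × String) :=
  [("m-", "monster"), ("boss-", "monster"), ("map-", "map"), ("skill-", "skill")]

def infer_asset_type_py_alt (asset_key : String) (lookups : Option (List (String × List (String × String)))) : String :=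
  let byScan : Option String :=
    match lookups with
    | some l =>
      if l.isEmpty then none
      else l.foldl (pvStep asset_key) none
    | none => none
  match byScan with
  | some t => t
  | none =>
    let key := PySem.Str.lower asset_key
    match pvPrefixTable.find? (fun p => PySem.Str.startswith key p.1) with
    | some p => p.2
    | none => "misc"

-- ===== PRECONDITION & SPEC =====
-- Pre_ excludes association lists with duplicate keys, which a real Python dict cannot contain:
-- there A's first-match lookup and B's whole-list scan are both accidental readings of an impossible value.
def Pre_infer_asset_type_py (asset_key : String) (lookups : Option (List (String × List (String × String)))) : Prop :=
  ((lookups.getD []).map Prod.fst).Nodup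
instance (asset_key : String) (lookups : Option (List (String × List (String × String)))) : Decidable (Pre_infer_asset_type_py asset_key lookups) := by unfold Pre_infer_asset_type_py; infer_instance

def pvWitness_infer_asset_type_py : String × (Option (List (String × List (String × String)))) :=
  ("m-x", some [("monster", [("m-x", "a")]), ("map", [])])

def Spec_infer_asset_type_py (asset_key : String) (lookups : Option (List (String × List (String × String)))) (out : String) : Prop := out = infer_asset_type_py_alt asset_key lookups
instance (asset_key : String) (lookups : Option (List (String × List (String × String)))) (out : String) : Decidable (Spec_infer_asset_type_py asset_key lookups out) := by unfold Spec_infer_asset_type_py; infer_instance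

-- ===== CLAIM (what is proved, stated in full; the proofs are below) =====
def Claim_equal_infer_asset_type_py : Prop := ∀ (asset_key : String) (lookups : Option (List (String × List (String × String)))), Dom_infer_asset_type_py asset_key lookups → Pre_infer_asset_type_py asset_key lookups → Spec_infer_asset_type_py asset_key lookups (infer_asset_type_py asset_key lookups)

-- ===== LEMMAS AND PROOFS =====

-- does any table listed under type t contain asset_key?
def pvHasT (asset_key : String) (l : List (String × List (String × String))) (t : String) : Bool :=
  l.any (fun e => e.1 == t && e.2.any (fun kv => kv.1 == asset_key))

theorem pvHasT_of_not_mem (ak t : String) (l : List (String × List (String × String)))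
    (h : t ∉ l.map Prod.fst) : pvHasT ak l t = false := by
  induction l with
  | nil => rfl
  | cons e rest ih =>
    simp only [List.map_cons, List.mem_cons, not_or] at h
    simp [pvHasT, List.any_cons] at *
    exact ⟨fun he => absurd he.symm h.1, ih h.2⟩

-- under unique keys, membership in the FIRST table for t (A) = membership in ANY table for t (B)
theorem pvHasT_eq_get (ak t : String) (l : List (String × List (String × String)))
    (hnd : (l.map Prod.fst).Nodup) :
    ((pvLkGet l t).any (fun kv => kv.1 == ak)) = pvHasT ak l t := by
  induction l with
  | nil => rfl
  | cons e rest ih =>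
    obtain ⟨k, tab⟩ := e
    simp only [List.map_cons, List.nodup_cons] at hnd
    have hlk : pvLkGet ((k, tab) :: rest) t = if k == t then tab else pvLkGet rest t := by
      by_cases hk : (k == t) = true <;>
        simp [pvLkGet, PySem.Dict.getD_eq_get?_getD, PySem.Dict.get?_mk_cons, hk]
    have hcons : pvHasT ak ((k, tab) :: rest) t
        = (((k == t) && tab.any (fun kv => kv.1 == ak)) || pvHasT ak rest t) := rfl
    by_cases he : k = t
    · subst he
      have hb : (k == k) = true := by simp
      rw [hlk, if_pos hb, hcons, pvHasT_of_not_mem ak k rest hnd.1, hb]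
      simp
    · have hb : (k == t) = false := by simp [he]
      rw [hlk, if_neg (by simp [he]), hcons, hb, ih hnd.2]
      simp

def pvValid (o : Option String) : Prop :=
  o = none ∨ o = some "monster" ∨ o = some "map" ∨ o = some "skill"

theorem pvStep_valid (ak : String) (acc : Option String) (e : String × List (String × String))
    (h : pvValid acc) : pvValid (pvStep ak acc e) := by
  cases hget : pvPrio.get? e.1 with
  | none => unfold pvStep; rw [hget]; exact h
  | some r =>
    have he : e.1 = "monster" ∨ e.1 = "map" ∨ e.1 = "skill" := by
      by_cases h1 : e.1 = "monster"; · tauto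
      by_cases h2 : e.1 = "map"; · tauto
      by_cases h3 : e.1 = "skill"; · tauto
      rw [show pvPrio.get? e.1 = none from by
        simp [pvPrio, PySem.Dict.get?, PySem.Dict.get?_mk_cons, Ne.symm h1, Ne.symm h2,
          Ne.symm h3]] at hget
      cases hget
    unfold pvStep
    rw [hget]
    dsimp only
    split_ifs with hc
    · unfold pvValid; rcases he with he | he | he <;> rw [he] <;> tauto
    · exact h

theorem pvFoldScan (ak : String) (l : List (String × List (String × String))) (acc : Option String)
    (hacc : pvValid acc) :
    l.foldl (pvStep ak) acc =
      if pvHasT ak l "monster" then some "monster"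
      else if acc = some "monster" then acc
      else if pvHasT ak l "map" then some "map"
      else if acc = some "map" then acc
      else if pvHasT ak l "skill" then some "skill"
      else acc := by
  induction l generalizing acc with
  | nil =>
    rcases hacc with h | h | h | h <;> simp [pvHasT, h]
  | cons e rest ih =>
    obtain ⟨t, tab⟩ := e
    have hcons : ∀ t', pvHasT ak ((t, tab) :: rest) t'
        = (((t == t') && tab.any (fun kv => kv.1 == ak)) || pvHasT ak rest t') := fun _ => rfl
    simp only [List.foldl_cons, hcons]
    rw [ih _ (pvStep_valid ak acc (t, tab) hacc)]
    by_cases h1 : t = "monster"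
    · subst h1
      rcases hacc with h | h | h | h <;> subst h <;>
        cases hm : tab.any (fun kv => kv.1 == ak) <;>
          cases hM : pvHasT ak rest "monster" <;> cases hP : pvHasT ak rest "map" <;>
            cases hS : pvHasT ak rest "skill" <;>
              simp [pvStep, pvPrio, PySem.Dict.get?_mk_cons, PySem.Dict.getD_eq_get?_getD,
                PySem.Dict.get?_empty, hm, hM, hP, hS]
    by_cases h2 : t = "map"
    · subst h2
      rcases hacc with h | h | h | h <;> subst h <;>
        cases hm : tab.any (fun kv => kv.1 == ak) <;>
          cases hM : pvHasT ak rest "monster" <;> cases hP : pvHasT ak rest "map" <;>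
            cases hS : pvHasT ak rest "skill" <;>
              simp [pvStep, pvPrio, PySem.Dict.get?_mk_cons, PySem.Dict.getD_eq_get?_getD,
                PySem.Dict.get?_empty, hm, hM, hP, hS]
    by_cases h3 : t = "skill"
    · subst h3
      rcases hacc with h | h | h | h <;> subst h <;>
        cases hm : tab.any (fun kv => kv.1 == ak) <;>
          cases hM : pvHasT ak rest "monster" <;> cases hP : pvHasT ak rest "map" <;>
            cases hS : pvHasT ak rest "skill" <;>
              simp [pvStep, pvPrio, PySem.Dict.get?_mk_cons, PySem.Dict.getD_eq_get?_getD,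
                PySem.Dict.get?_empty, hm, hM, hP, hS]
    · rcases hacc with h | h | h | h <;> subst h <;>
        cases hM : pvHasT ak rest "monster" <;> cases hP : pvHasT ak rest "map" <;>
          cases hS : pvHasT ak rest "skill" <;>
            simp [pvStep, pvPrio, PySem.Dict.get?, PySem.Dict.get?_mk_cons,
              Ne.symm h1, Ne.symm h2, Ne.symm h3, h1, h2, h3, beq_iff_eq, hM, hP, hS]

-- A's startswith chain equals B's scan over the prefix table (stated on the char-list side)
theorem pvTailEq (ks : List Char) :
    (if PySem.Chars.startswith ks ['m', '-'] = true ∨ PySem.Chars.startswith ks ['b', 'o', 's', 's', '-'] = true then "monster"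
     else if PySem.Chars.startswith ks ['m', 'a', 'p', '-'] = true then "map"
     else if PySem.Chars.startswith ks ['s', 'k', 'i', 'l', 'l', '-'] = true then "skill" else "misc")
    = (match List.find? (fun p => PySem.Chars.startswith ks p.1.toList) pvPrefixTable with
       | some p => p.2
       | none => "misc") := by
  cases h1 : PySem.Chars.startswith ks ['m', '-'] <;>
    cases h2 : PySem.Chars.startswith ks ['b', 'o', 's', 's', '-'] <;>
      cases h3 : PySem.Chars.startswith ks ['m', 'a', 'p', '-'] <;>
        cases h4 : PySem.Chars.startswith ks ['s', 'k', 'i', 'l', 'l', '-'] <;>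
          simp [pvPrefixTable, List.find?, h1, h2, h3, h4]

-- ===== VERDICT (by name: the statement is the Claim_ definition above) =====
theorem infer_asset_type_py_spec : Claim_equal_infer_asset_type_py := by
  intro asset_key lookups _ hpre
  unfold Spec_infer_asset_type_py infer_asset_type_py infer_asset_type_py_alt
  cases lookups with
  | none => simp; exact pvTailEq _
  | some l =>
    have hnd : (l.map Prod.fst).Nodup := hpre
    by_cases hl : l.isEmpty = true
    · simp [hl]; exact pvTailEq _
    · have hfold := pvFoldScan asset_key l none (Or.inl rfl)
      simp only [hl, if_neg, hfold]
      have em := pvHasT_eq_get asset_key "monster" l hnd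
      have ep := pvHasT_eq_get asset_key "map" l hnd
      have es := pvHasT_eq_get asset_key "skill" l hnd
      simp only [List.find?, em, ep, es]
      cases hm : pvHasT asset_key l "monster" <;>
        cases hp : pvHasT asset_key l "map" <;>
          cases hs : pvHasT asset_key l "skill" <;>
            simp [hm, hp, hs] <;> exact pvTailEq _
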